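-- pv_equiv track=rewrite | github.com/heyitsgautham/career-forge | project/backend/app/services/resume_agent.py | _remove_unbalanced_list_ends
-- ===== SOURCE A (Python) =====
-- from typing import List, Dict, Any, Optional
--
-- def _remove_unbalanced_list_ends(latex: str) -> str:
--     r"""Remove unmatched \resumeItemListEnd and \resumeSubHeadingListEnd.
--
--     After the other sanitizer passes, Claude's original wrong wrappers can
--     leave behind orphaned closing commands that have no opening counterpart.
--     This function walks through each list env type: if at any point the
--     running balance (opens - closes) goes negative, the extra close is removed.
--     """
--     env_pairs = [
--         (r"\resumeItemListStart", r"\resumeItemListEnd"),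
--         (r"\resumeSubHeadingListStart", r"\resumeSubHeadingListEnd"),
--     ]
--     for start_cmd, end_cmd in env_pairs:
--         lines = latex.split("\n")
--         result: List[str] = []
--         depth = 0
--         for line in lines:
--             stripped = line.strip()
--             if start_cmd in stripped:
--                 depth += 1
--             if end_cmd in stripped:
--                 if depth <= 0:
--                     # Orphaned close — skip this line
--                     continue
--                 depth -= 1
--             result.append(line)
--         latex = "\n".join(result)
--     return latex
-- ===== SOURCE B (Python) =====
-- def _remove_unbalanced_list_ends(latex: str) -> str:
--     """One fused pass: split once, keep a depth counter per env pair, build one result list."""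
--     out = []
--     d_item = 0
--     d_sub = 0
--     for line in latex.split("\n"):
--         stripped = line.strip()
--         if "\\resumeItemListStart" in stripped:
--             d_item += 1
--         if "\\resumeItemListEnd" in stripped:
--             if d_item <= 0:
--                 continue
--             d_item -= 1
--         if "\\resumeSubHeadingListStart" in stripped:
--             d_sub += 1
--         if "\\resumeSubHeadingListEnd" in stripped:
--             if d_sub <= 0:
--                 continue
--             d_sub -= 1
--         out.append(line)
--     return "\n".join(out)
-- ===== Notes on version B (the rewrite author's own statement) =====
-- stated objective: alternative
-- what changed: A makes two sequential passes (split, filter with one depth counter, join — once per env pair, re-splitting the intermediate string); B splits once and removes both kinds of orphaned closers in a single traversal maintaining two depth counters in lockstep, joining once.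
import Mathlib
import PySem

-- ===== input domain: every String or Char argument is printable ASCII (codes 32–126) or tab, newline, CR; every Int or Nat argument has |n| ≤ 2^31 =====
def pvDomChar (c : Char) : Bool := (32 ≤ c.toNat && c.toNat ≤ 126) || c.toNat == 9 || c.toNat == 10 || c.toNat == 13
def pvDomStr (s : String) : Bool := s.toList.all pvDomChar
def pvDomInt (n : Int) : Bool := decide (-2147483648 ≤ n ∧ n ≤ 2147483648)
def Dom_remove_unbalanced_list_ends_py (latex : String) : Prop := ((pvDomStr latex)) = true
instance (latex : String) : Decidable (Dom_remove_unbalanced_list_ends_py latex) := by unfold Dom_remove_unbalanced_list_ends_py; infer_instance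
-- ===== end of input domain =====

-- B fuses A's two sequential split/filter/join passes into one traversal with two depth counters (objective: alternative decomposition, same asymptotic cost).

-- ===== PORT A =====
-- the four LaTeX commands, as character lists
def pvIS : List Char := "\\resumeItemListStart".toList
def pvIE : List Char := "\\resumeItemListEnd".toList
def pvSS : List Char := "\\resumeSubHeadingListStart".toList
def pvSE : List Char := "\\resumeSubHeadingListEnd".toList

-- one iteration of A's inner `for line in lines` loop (state = (result, depth))
def pvStepA (sC eC : List Char) (st : List (List Char) × Int) (line : List Char) : List (List Char) × Int :=
  let stripped := PySem.Chars.strip line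
  let depth := if PySem.Chars.isIn sC stripped then st.2 + 1 else st.2
  if PySem.Chars.isIn eC stripped then
    if depth ≤ 0 then (st.1, depth)            -- orphaned close: `continue`
    else (st.1 ++ [line], depth - 1)
  else (st.1 ++ [line], depth)

-- one iteration of A's outer `for start_cmd, end_cmd in env_pairs` loop
def pvPassA (p : List Char × List Char) (ltx : List Char) : List Char :=
  let lines := PySem.Chars.splitOn ltx ['\n']
  PySem.Chars.join ['\n'] (lines.foldl (pvStepA p.1 p.2) ([], 0)).1

def remove_unbalanced_list_ends_py (latex : String) : String :=
  String.ofList ([(pvIS, pvIE), (pvSS, pvSE)].foldl (fun ltx p => pvPassA p ltx) latex.toList)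

-- ===== PORT B =====
-- one iteration of B's single fused loop (state = (out, d_item, d_sub))
def pvStepB (st : List (List Char) × Int × Int) (line : List Char) : List (List Char) × Int × Int :=
  let stripped := PySem.Chars.strip line
  let d1 := if PySem.Chars.isIn pvIS stripped then st.2.1 + 1 else st.2.1
  if PySem.Chars.isIn pvIE stripped && decide (d1 ≤ 0) then (st.1, d1, st.2.2)   -- `continue`
  else
    let d1' := if PySem.Chars.isIn pvIE stripped then d1 - 1 else d1
    let d2 := if PySem.Chars.isIn pvSS stripped then st.2.2 + 1 else st.2.2
    if PySem.Chars.isIn pvSE stripped && decide (d2 ≤ 0) then (st.1, d1', d2)    -- `continue`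
    else
      let d2' := if PySem.Chars.isIn pvSE stripped then d2 - 1 else d2
      (st.1 ++ [line], d1', d2')

def remove_unbalanced_list_ends_py_alt (latex : String) : String :=
  String.ofList (PySem.Chars.join ['\n']
    (((PySem.Chars.splitOn latex.toList ['\n']).foldl pvStepB ([], 0, 0)).1))

-- ===== PRECONDITION & SPEC =====
def Spec_remove_unbalanced_list_ends_py (latex : String) (out : String) : Prop := out = remove_unbalanced_list_ends_py_alt latex
instance (latex : String) (out : String) : Decidable (Spec_remove_unbalanced_list_ends_py latex out) := by unfold Spec_remove_unbalanced_list_ends_py; infer_instance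

-- ===== CLAIM (what is proved, stated in full; the proofs are below) =====
def Claim_equal_remove_unbalanced_list_ends_py : Prop := ∀ (latex : String), Dom_remove_unbalanced_list_ends_py latex → Spec_remove_unbalanced_list_ends_py latex (remove_unbalanced_list_ends_py latex)

-- ===== LEMMAS AND PROOFS =====

-- recursive restatement of one of A's passes
def pvPassRec (sC eC : List Char) : List (List Char) → Int → List (List Char)
  | [], _ => []
  | L :: ls, d =>
    let stripped := PySem.Chars.strip L
    let d' := if PySem.Chars.isIn sC stripped then d + 1 else d
    if PySem.Chars.isIn eC stripped then
      if d' ≤ 0 then pvPassRec sC eC ls d'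
      else L :: pvPassRec sC eC ls (d' - 1)
    else L :: pvPassRec sC eC ls d'

-- recursive restatement of B's fused loop
def pvFusedRec : List (List Char) → Int → Int → List (List Char)
  | [], _, _ => []
  | L :: ls, d1, d2 =>
    let stripped := PySem.Chars.strip L
    let d1a := if PySem.Chars.isIn pvIS stripped then d1 + 1 else d1
    if PySem.Chars.isIn pvIE stripped && decide (d1a ≤ 0) then pvFusedRec ls d1a d2
    else
      let d1b := if PySem.Chars.isIn pvIE stripped then d1a - 1 else d1a
      let d2a := if PySem.Chars.isIn pvSS stripped then d2 + 1 else d2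
      if PySem.Chars.isIn pvSE stripped && decide (d2a ≤ 0) then pvFusedRec ls d1b d2a
      else
        let d2b := if PySem.Chars.isIn pvSE stripped then d2a - 1 else d2a
        L :: pvFusedRec ls d1b d2b

lemma pvFoldA_eq (sC eC : List Char) :
    ∀ (lines : List (List Char)) (acc : List (List Char)) (d : Int),
      (lines.foldl (pvStepA sC eC) (acc, d)).1 = acc ++ pvPassRec sC eC lines d := by
  intro lines
  induction lines with
  | nil => intro acc d; simp [pvPassRec]
  | cons L ls ih =>
    intro acc d
    simp only [List.foldl_cons, pvStepA, pvPassRec]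
    split_ifs with h1 h2 <;> simp [ih]

lemma pvFoldB_eq :
    ∀ (lines : List (List Char)) (acc : List (List Char)) (d1 d2 : Int),
      (lines.foldl pvStepB (acc, d1, d2)).1 = acc ++ pvFusedRec lines d1 d2 := by
  intro lines
  induction lines with
  | nil => intro acc d1 d2; simp [pvFusedRec]
  | cons L ls ih =>
    intro acc d1 d2
    simp only [List.foldl_cons, pvStepB, pvFusedRec]
    split_ifs with h1 h2 <;> simp [ih]

-- B's fused loop computes exactly A's second pass applied to A's first pass
lemma pvFused_eq_two_pass :
    ∀ (lines : List (List Char)) (d1 d2 : Int),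
      pvFusedRec lines d1 d2 = pvPassRec pvSS pvSE (pvPassRec pvIS pvIE lines d1) d2 := by
  intro lines
  induction lines with
  | nil => intro d1 d2; simp [pvFusedRec, pvPassRec]
  | cons L ls ih =>
    intro d1 d2
    simp only [pvFusedRec, pvPassRec]
    split_ifs with h1 h2 h3 h4 h5 h6 h7 <;>
      simp_all [pvPassRec]

-- PySem's splitOn on a one-character separator is Mathlib's List.splitOn
lemma pvGo_eq (c : Char) :
    ∀ (fuel : Nat) (l cur : List Char) (acc : List (List Char)), l.length ≤ fuel →
      PySem.Chars.splitOn.go [c] fuel l cur acc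
        = acc.reverse ++ (List.splitOn c l).modifyHead (cur.reverse ++ ·) := by
  intro fuel
  induction fuel with
  | zero =>
    intro l cur acc h
    have : l = [] := by cases l <;> simp_all
    subst this
    simp [PySem.Chars.splitOn.go, List.splitOn]
  | succ fuel ih =>
    intro l cur acc h
    cases l with
    | nil => simp [PySem.Chars.splitOn.go, List.splitOn]
    | cons x rest =>
      by_cases hx : x = c
      · subst hx
        have hpre : [x].isPrefixOf (x :: rest) = true := by simp [List.isPrefixOf]
        rw [PySem.Chars.splitOn.go]
        simp only [hpre, if_pos]
        rw [show List.drop [x].length (x :: rest) = rest from rfl]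
        rw [ih rest [] (cur.reverse :: acc) (by simpa using Nat.lt_succ_iff.mp (by simpa using h))]
        obtain ⟨hd, tl, he⟩ := List.exists_cons_of_ne_nil (List.splitOnP_ne_nil (· == x) rest)
        simp [List.splitOn, List.splitOnP_cons, he]
      · have hpre : [c].isPrefixOf (x :: rest) = false := by
          simp [List.isPrefixOf, Ne.symm hx]
        rw [PySem.Chars.splitOn.go]
        simp only [hpre, Bool.false_eq_true, if_false]
        rw [ih rest (x :: cur) acc (by simpa using Nat.lt_succ_iff.mp (by simpa using h))]
        obtain ⟨hd, tl, he⟩ := List.exists_cons_of_ne_nil (List.splitOnP_ne_nil (· == c) rest)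
        simp [List.splitOn, List.splitOnP_cons, hx, he]

lemma pvSplitOn_eq (s : List Char) (c : Char) :
    PySem.Chars.splitOn s [c] = List.splitOn c s := by
  rw [PySem.Chars.splitOn, pvGo_eq c _ s [] [] (by omega)]
  obtain ⟨hd, tl, he⟩ := List.exists_cons_of_ne_nil (List.splitOnP_ne_nil (· == c) s)
  simp [List.splitOn, he]

-- pieces produced by splitOn never contain the separator
lemma pvSplitOn_not_mem (c : Char) :
    ∀ (s : List Char), ∀ p ∈ List.splitOn c s, c ∉ p := by
  intro s
  induction s with
  | nil => intro p hp; simp [List.splitOn] at hp; simp [hp]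
  | cons x rest ih =>
    intro p hp
    by_cases hx : x = c
    · subst hx
      simp [List.splitOn, List.splitOnP_cons] at hp
      rcases hp with h | h
      · simp [h]
      · exact ih p (by simpa [List.splitOn] using h)
    · obtain ⟨hd, tl, he⟩ := List.exists_cons_of_ne_nil (List.splitOnP_ne_nil (· == c) rest)
      simp [List.splitOn, List.splitOnP_cons, hx, he] at hp
      rcases hp with h | h
      · subst h
        intro hmem
        rcases List.mem_cons.mp hmem with h' | h'
        · exact hx h'.symm
        · exact ih hd (by simp [List.splitOn, he]) h'
      · exact ih p (by simp [List.splitOn, he, h])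

-- every line kept by a pass was one of the input lines
lemma pvPassRec_subset (sC eC : List Char) :
    ∀ (lines : List (List Char)) (d : Int) (L : List Char),
      L ∈ pvPassRec sC eC lines d → L ∈ lines := by
  intro lines
  induction lines with
  | nil => intro d L h; simp [pvPassRec] at h
  | cons M ls ih =>
    intro d L h
    simp only [pvPassRec] at h
    split_ifs at h <;>
      first
        | exact List.mem_cons_of_mem _ (ih _ _ h)
        | (rcases List.mem_cons.mp h with h | h
           · simp [h]
           · exact List.mem_cons_of_mem _ (ih _ _ h))

-- ===== VERDICT (by name: the statement is the Claim_ definition above) =====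
theorem remove_unbalanced_list_ends_py_spec : Claim_equal_remove_unbalanced_list_ends_py := by
  intro latex _
  unfold Spec_remove_unbalanced_list_ends_py
  unfold remove_unbalanced_list_ends_py remove_unbalanced_list_ends_py_alt
  simp only [List.foldl_cons, List.foldl_nil, pvPassA]
  rw [pvFoldA_eq, pvFoldA_eq, pvFoldB_eq]
  simp only [List.nil_append]
  rw [pvFused_eq_two_pass]
  set l1 := PySem.Chars.splitOn latex.toList ['\n'] with hl1
  set r1 := pvPassRec pvIS pvIE l1 0 with hr1
  by_cases hnil : r1 = []
  · rw [hnil]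
    rw [show PySem.Chars.join ['\n'] [] = [] from rfl]
    rw [show PySem.Chars.splitOn ([] : List Char) ['\n'] = [[]] from by decide]
    rw [show pvPassRec pvSS pvSE [[]] 0 = [[]] from by decide,
        show pvPassRec pvSS pvSE [] 0 = [] from rfl]
    decide
  · have hjoin : PySem.Chars.join ['\n'] r1 = ['\n'].intercalate r1 := rfl
    have hsp : PySem.Chars.splitOn (PySem.Chars.join ['\n'] r1) ['\n'] = r1 := by
      rw [hjoin, pvSplitOn_eq]
      apply List.splitOn_intercalate
      · intro l hl
        exact pvSplitOn_not_mem '\n' latex.toList l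
          (by rw [← pvSplitOn_eq]; exact pvPassRec_subset _ _ _ _ _ (hr1 ▸ hl))
      · exact hnil
    rw [hsp]
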